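-- pv_equiv track=rewrite | github.com/pixie-io/pixie | src/e2e_test/px_cluster/test_minikube_versions.py | filter_out_untested_versions
-- ===== SOURCE A (Python) =====
-- def filter_out_untested_versions(versions):
--     # remove versions that pattern match to the following:
--     untesteds = [
--         'beta',
--         'v1.7',
--         'v1.8',
--     ]
--     for u in untesteds:
--         versions = [v for v in versions if u not in v]
--     return versions
-- ===== SOURCE B (Python) =====
-- def filter_out_untested_versions(versions):
--     # remove versions that pattern match to the following:
--     untesteds = ('beta', 'v1.7', 'v1.8')
--
--     def blacklisted(v):
--         # single left-to-right scan of v: at each position test whether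
--         # any blacklist pattern starts exactly there
--         for i in range(len(v)):
--             if v.startswith(untesteds, i):
--                 return True
--         return False
--
--     return [v for v in versions if not blacklisted(v)]
-- ===== Notes on version B (the rewrite author's own statement) =====
-- stated objective: alternative
-- what changed: Instead of three sequential substring-filter passes building intermediate lists, B does one pass over the versions and decides each version by a single left-to-right position scan of the string, testing at every index whether any blacklist pattern starts exactly there (start-anchored matching via startswith with a start offset).
import Mathlib
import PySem

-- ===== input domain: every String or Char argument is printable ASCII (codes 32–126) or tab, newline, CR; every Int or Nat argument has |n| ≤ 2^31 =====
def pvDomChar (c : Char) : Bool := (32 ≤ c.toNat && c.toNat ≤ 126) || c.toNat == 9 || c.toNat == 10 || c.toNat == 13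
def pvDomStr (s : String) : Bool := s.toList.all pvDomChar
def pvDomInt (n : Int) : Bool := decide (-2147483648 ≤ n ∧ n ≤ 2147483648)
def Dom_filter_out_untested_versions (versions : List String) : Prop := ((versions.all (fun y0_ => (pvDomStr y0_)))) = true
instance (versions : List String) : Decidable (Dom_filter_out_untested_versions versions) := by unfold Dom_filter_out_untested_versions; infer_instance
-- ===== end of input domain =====

-- B decides each version by one left-to-right anchored position scan (startswith at
-- every index) instead of A's three sequential substring-filter passes; objective: alternative.

-- ===== PORT A =====
def pvUntesteds : List String := ["beta", "v1.7", "v1.8"]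

def filter_out_untested_versions (versions : List String) : List String :=
  pvUntesteds.foldl (fun vs u => vs.filter (fun v => !(PySem.Str.isIn u v))) versions

-- ===== PORT B =====
-- `for i in range(len(v)): if v.startswith(untesteds, i): return True` — recursion on the
-- suffix: position i corresponds to the suffix starting at i (positions 0..len(v)-1).
def pvBlacklistedFrom : List Char → Bool
  | [] => false
  | c :: rest =>
      pvUntesteds.any (fun u => PySem.Chars.startswith (c :: rest) u.toList)
      || pvBlacklistedFrom rest

def filter_out_untested_versions_alt (versions : List String) : List String :=
  versions.filter (fun v => !pvBlacklistedFrom v.toList)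

-- ===== PRECONDITION & SPEC =====
def Spec_filter_out_untested_versions (versions : List String) (out : List String) : Prop := out = filter_out_untested_versions_alt versions
instance (versions : List String) (out : List String) : Decidable (Spec_filter_out_untested_versions versions out) := by unfold Spec_filter_out_untested_versions; infer_instance

-- ===== CLAIM (what is proved, stated in full; the proofs are below) =====
def Claim_equal_filter_out_untested_versions : Prop := ∀ (versions : List String), Dom_filter_out_untested_versions versions → Spec_filter_out_untested_versions versions (filter_out_untested_versions versions)

-- ===== LEMMAS AND PROOFS =====

-- anchored-match-here OR match-in-tail = substring occurrence (for every pattern u)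
theorem pv_anchor_step (u : List Char) (c : Char) (rest : List Char) :
    (PySem.Chars.startswith (c :: rest) u || PySem.Chars.isIn u rest)
      = PySem.Chars.isIn u (c :: rest) := by
  refine Bool.eq_iff_iff.mpr ?_
  simp [PySem.Chars.startswith_iff, PySem.Chars.isIn_iff_infix, List.infix_cons_iff]

-- the position scan computes exactly "some blacklist pattern is a substring"
theorem pv_blacklisted_eq (cs : List Char) :
    pvBlacklistedFrom cs = pvUntesteds.any (fun u => PySem.Chars.isIn u.toList cs) := by
  induction cs with
  | nil => decide
  | cons c rest ih =>
      rw [pvBlacklistedFrom, ih]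
      simp only [pvUntesteds, List.any_cons, List.any_nil, Bool.or_false]
      rw [← pv_anchor_step _ c rest, ← pv_anchor_step _ c rest, ← pv_anchor_step _ c rest]
      ac_rfl

-- ===== VERDICT (by name: the statement is the Claim_ definition above) =====
theorem filter_out_untested_versions_spec : Claim_equal_filter_out_untested_versions := by
  intro versions _
  unfold Spec_filter_out_untested_versions
  unfold filter_out_untested_versions filter_out_untested_versions_alt
  simp only [pvUntesteds, List.foldl_cons, List.foldl_nil, List.filter_filter]
  congr 1
  funext v
  rw [pv_blacklisted_eq]
  simp [pvUntesteds, PySem.Str.isIn]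
  ac_rfl
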